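-- pv_equiv track=rewrite | github.com/SangamNirala/scriptNew | backend/lib/context_integration.py | _extract_audience_indicators
-- ===== SOURCE A (Python) =====
-- from typing import Dict, List, Any, Optional
--
-- def _extract_audience_indicators(prompt: str) -> List[str]:
--     """Extract audience indicators from prompt"""
--     indicators = []
--     prompt_lower = prompt.lower()
--
--     # Age indicators
--     if any(word in prompt_lower for word in ['teen', 'young', 'millennial', 'gen z']):
--         indicators.append('young_audience')
--     elif any(word in prompt_lower for word in ['adult', 'professional', 'career']):
--         indicators.append('professional_audience')
--     elif any(word in prompt_lower for word in ['senior', 'retirement', 'mature']):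
--         indicators.append('mature_audience')
--
--     # Interest indicators
--     if any(word in prompt_lower for word in ['beginner', 'learn', 'start', 'intro']):
--         indicators.append('beginner_level')
--     elif any(word in prompt_lower for word in ['advanced', 'expert', 'professional']):
--         indicators.append('expert_level')
--
--     return indicators
-- ===== SOURCE B (Python) =====
-- _KEYWORDS = ['teen', 'young', 'millennial', 'gen z', 'adult', 'professional',
--              'career', 'senior', 'retirement', 'mature', 'beginner', 'learn',
--              'start', 'intro', 'advanced', 'expert']
--
-- def _extract_audience_indicators(prompt):
--     """Extract audience indicators: one left-to-right scan collects the set of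
--     keywords that start at each position, then the labels are decided from
--     that matched set."""
--     text = prompt.lower()
--     found = set()
--     for i in range(len(text)):
--         for w in _KEYWORDS:
--             if text.startswith(w, i):
--                 found.add(w)
--     indicators = []
--     if not found.isdisjoint({'teen', 'young', 'millennial', 'gen z'}):
--         indicators.append('young_audience')
--     elif not found.isdisjoint({'adult', 'professional', 'career'}):
--         indicators.append('professional_audience')
--     elif not found.isdisjoint({'senior', 'retirement', 'mature'}):
--         indicators.append('mature_audience')
--     if not found.isdisjoint({'beginner', 'learn', 'start', 'intro'}):
--         indicators.append('beginner_level')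
--     elif not found.isdisjoint({'advanced', 'expert', 'professional'}):
--         indicators.append('expert_level')
--     return indicators
-- ===== Notes on version B (the rewrite author's own statement) =====
-- stated objective: alternative
-- what changed: Instead of running sixteen independent substring searches inside an if/elif chain, B makes a single left-to-right scan of the lowercased prompt that collects the set of all keywords starting at each position, and then decides the labels from that matched set with disjointness tests.
import Mathlib
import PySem

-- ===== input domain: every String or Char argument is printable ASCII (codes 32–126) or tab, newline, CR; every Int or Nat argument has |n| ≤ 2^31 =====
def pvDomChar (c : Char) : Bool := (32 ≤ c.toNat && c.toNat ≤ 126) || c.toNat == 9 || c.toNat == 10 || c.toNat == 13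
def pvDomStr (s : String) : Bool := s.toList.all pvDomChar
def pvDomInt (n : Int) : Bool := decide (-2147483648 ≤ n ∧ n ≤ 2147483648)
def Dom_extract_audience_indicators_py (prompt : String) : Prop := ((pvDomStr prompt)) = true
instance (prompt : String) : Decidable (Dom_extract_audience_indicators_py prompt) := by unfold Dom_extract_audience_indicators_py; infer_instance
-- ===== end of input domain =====

-- B replaces the sixteen independent substring searches of the if/elif chain by a
-- single left-to-right scan that collects the set of keywords starting at each
-- position, then decides the labels from that matched set; same return value.

-- ===== PORT A =====
def extract_audience_indicators_py (prompt : String) : List String :=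
  let indicators : List String := []
  let prompt_lower := PySem.Str.lower prompt
  -- Age indicators
  let indicators :=
    if ["teen", "young", "millennial", "gen z"].any (fun word => PySem.Str.isIn word prompt_lower) then
      indicators ++ ["young_audience"]
    else if ["adult", "professional", "career"].any (fun word => PySem.Str.isIn word prompt_lower) then
      indicators ++ ["professional_audience"]
    else if ["senior", "retirement", "mature"].any (fun word => PySem.Str.isIn word prompt_lower) then
      indicators ++ ["mature_audience"]
    else indicators
  -- Interest indicators
  let indicators :=
    if ["beginner", "learn", "start", "intro"].any (fun word => PySem.Str.isIn word prompt_lower) then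
      indicators ++ ["beginner_level"]
    else if ["advanced", "expert", "professional"].any (fun word => PySem.Str.isIn word prompt_lower) then
      indicators ++ ["expert_level"]
    else indicators
  indicators

-- ===== PORT B =====
def pvKeywords : List String :=
  ["teen", "young", "millennial", "gen z", "adult", "professional", "career",
   "senior", "retirement", "mature", "beginner", "learn", "start", "intro",
   "advanced", "expert"]

-- the scan: for each position i of text (= each nonempty suffix), add to the
-- set every keyword that starts there (text.startswith(w, i))
def pvScan (text : List Char) (found : PySem.Set String) : PySem.Set String :=
  match text with
  | [] => found
  | c :: rest =>
      pvScan rest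
        (pvKeywords.foldl
          (fun fd w => if w.toList.isPrefixOf (c :: rest) then PySem.Set.add fd w else fd)
          found)

def extract_audience_indicators_py_alt (prompt : String) : List String :=
  let text := PySem.Str.lower prompt
  let found := pvScan text.toList PySem.Set.empty
  let indicators : List String := []
  let indicators :=
    if ¬ PySem.Set.isdisjoint found ["teen", "young", "millennial", "gen z"] then
      indicators ++ ["young_audience"]
    else if ¬ PySem.Set.isdisjoint found ["adult", "professional", "career"] then
      indicators ++ ["professional_audience"]
    else if ¬ PySem.Set.isdisjoint found ["senior", "retirement", "mature"] then
      indicators ++ ["mature_audience"]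
    else indicators
  let indicators :=
    if ¬ PySem.Set.isdisjoint found ["beginner", "learn", "start", "intro"] then
      indicators ++ ["beginner_level"]
    else if ¬ PySem.Set.isdisjoint found ["advanced", "expert", "professional"] then
      indicators ++ ["expert_level"]
    else indicators
  indicators

-- ===== PRECONDITION & SPEC =====
def Spec_extract_audience_indicators_py (prompt : String) (out : List String) : Prop := out = extract_audience_indicators_py_alt prompt
instance (prompt : String) (out : List String) : Decidable (Spec_extract_audience_indicators_py prompt out) := by unfold Spec_extract_audience_indicators_py; infer_instance

-- ===== CLAIM =====
def Claim_equal_extract_audience_indicators_py : Prop := ∀ (prompt : String), Dom_extract_audience_indicators_py prompt → Spec_extract_audience_indicators_py prompt (extract_audience_indicators_py prompt)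

-- ===== LEMMAS AND PROOFS =====

theorem pv_mem_foldl (text : List Char) (kws : List String) (fd : PySem.Set String) (w : String) :
    w ∈ kws.foldl (fun fd w' => if w'.toList.isPrefixOf text then PySem.Set.add fd w' else fd) fd ↔
      w ∈ fd ∨ (w ∈ kws ∧ w.toList <+: text) := by
  induction kws generalizing fd with
  | nil => simp
  | cons a t ih =>
      simp only [List.foldl_cons, ih, List.mem_cons]
      by_cases h : a.toList <+: text
      · simp only [List.isPrefixOf_iff_prefix, h, if_true, PySem.Set.mem_add]
        constructor
        · rintro ((hf | rfl) | ⟨ht, hp⟩)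
          · exact Or.inl hf
          · exact Or.inr ⟨Or.inl rfl, h⟩
          · exact Or.inr ⟨Or.inr ht, hp⟩
        · rintro (hf | ⟨(rfl | ht), hp⟩)
          · exact Or.inl (Or.inl hf)
          · exact Or.inl (Or.inr rfl)
          · exact Or.inr ⟨ht, hp⟩
      · simp only [List.isPrefixOf_iff_prefix, h, if_false]
        constructor
        · rintro (hf | ⟨ht, hp⟩)
          · exact Or.inl hf
          · exact Or.inr ⟨Or.inr ht, hp⟩
        · rintro (hf | ⟨(rfl | ht), hp⟩)
          · exact Or.inl hf
          · exact absurd hp h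
          · exact Or.inr ⟨ht, hp⟩

theorem pv_mem_scan (text : List Char) (fd : PySem.Set String) (w : String) (hw : w.toList ≠ []) :
    w ∈ pvScan text fd ↔ w ∈ fd ∨ (w ∈ pvKeywords ∧ ∃ j, w.toList <+: text.drop j) := by
  induction text generalizing fd with
  | nil =>
      simp only [pvScan, List.drop_nil]
      constructor
      · exact Or.inl
      · rintro (h | ⟨_, _, hp⟩)
        · exact h
        · exact absurd (List.prefix_nil.mp hp) hw
  | cons c rest ih =>
      simp only [pvScan, ih, pv_mem_foldl]
      constructor
      · rintro ((h | ⟨hk, hp⟩) | ⟨hk, j, hj⟩)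
        · exact Or.inl h
        · exact Or.inr ⟨hk, 0, hp⟩
        · exact Or.inr ⟨hk, j + 1, hj⟩
      · rintro (h | ⟨hk, j, hj⟩)
        · exact Or.inl (Or.inl h)
        · cases j with
          | zero => exact Or.inl (Or.inr ⟨hk, hj⟩)
          | succ j => exact Or.inr ⟨hk, j, hj⟩

theorem pv_mem_found (pl : String) (w : String) (hk : w ∈ pvKeywords) (hw : w.toList ≠ []) :
    w ∈ pvScan pl.toList PySem.Set.empty ↔ PySem.Str.isIn w pl = true := by
  rw [pv_mem_scan _ _ _ hw]
  rw [PySem.Str.isIn_eq, ← PySem.Chars.exists_prefix_drop_iff_isIn]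
  simp [PySem.Set.empty, hk]

theorem pv_cond_eq (pl : String) (group : List String)
    (hsub : ∀ w ∈ group, w ∈ pvKeywords ∧ w.toList ≠ []) :
    (group.any (fun word => PySem.Str.isIn word pl) = true ↔
      ¬ PySem.Set.isdisjoint (pvScan pl.toList PySem.Set.empty) group = true) := by
  rw [List.any_eq_true]
  rw [show (¬ PySem.Set.isdisjoint (pvScan pl.toList PySem.Set.empty) group = true) ↔
      ∃ x ∈ pvScan pl.toList PySem.Set.empty, x ∈ group by
    rw [PySem.Set.isdisjoint_iff]; push Not; simp]
  constructor
  · rintro ⟨w, hwg, hin⟩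
    exact ⟨w, (pv_mem_found pl w (hsub w hwg).1 (hsub w hwg).2).mpr hin, hwg⟩
  · rintro ⟨w, hin, hwg⟩
    exact ⟨w, hwg, (pv_mem_found pl w (hsub w hwg).1 (hsub w hwg).2).mp hin⟩

set_option maxHeartbeats 1000000 in
-- ===== VERDICT =====
theorem extract_audience_indicators_py_spec : Claim_equal_extract_audience_indicators_py := by
  intro prompt _
  unfold Spec_extract_audience_indicators_py extract_audience_indicators_py extract_audience_indicators_py_alt
  set pl := PySem.Str.lower prompt with hpl
  have h1 := pv_cond_eq pl ["teen", "young", "millennial", "gen z"] (by decide)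
  have h2 := pv_cond_eq pl ["adult", "professional", "career"] (by decide)
  have h3 := pv_cond_eq pl ["senior", "retirement", "mature"] (by decide)
  have h4 := pv_cond_eq pl ["beginner", "learn", "start", "intro"] (by decide)
  have h5 := pv_cond_eq pl ["advanced", "expert", "professional"] (by decide)
  simp only [← h1, ← h2, ← h3, ← h4, ← h5]
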